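-- pv_equiv track=rewrite | github.com/hutec/AoC | 2022/python/day08_1.py | visible_from_top
-- ===== SOURCE A (Python) =====
-- from copy import deepcopy
-- from typing import List
--
-- def visible_from_top(grid) -> List[List[bool]]:
--     """Converts a grid of heights to a grid of booleans indicating whether a cell is visible from top."""
--     n_cols = len(grid[0])
--     n_rows = len(grid)
--     visible_top = deepcopy(grid)
--     for row in range(n_rows):
--         for col in range(n_cols):
--             if row == 0:
--                 visible_top[row][col] = (True, grid[row][col])  # (visible, max height)
--             else:
--                 is_higher = grid[row][col] > visible_top[row - 1][col][1]
--                 if is_higher: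
--                     visible_top[row][col] = (True, grid[row][col])
--                 else:
--                     visible_top[row][col] = (False, visible_top[row - 1][col][1])
--
--     return [list(map(lambda x: x[0], row)) for row in visible_top]
-- ===== SOURCE B (Python) =====
-- def visible_from_top(grid):
--     """Converts a grid of heights to a grid of booleans indicating whether a cell is visible from top."""
--     n_cols = len(grid[0])
--     return [
--         [r == 0 or all(grid[k][c] < grid[r][c] for k in range(r)) for c in range(n_cols)]
--         for r in range(len(grid))
--     ]
-- ===== Notes on version B (the rewrite author's own statement) =====
-- stated objective: simpler
-- what changed: B discards A's dynamic-programming table of (visible, running-max) pairs and computes each cell directly from the definition of visibility - a cell is visible iff it is strictly taller than every cell above it - with a nested comprehension that rescans the column prefix for every cell.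
import Mathlib
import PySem

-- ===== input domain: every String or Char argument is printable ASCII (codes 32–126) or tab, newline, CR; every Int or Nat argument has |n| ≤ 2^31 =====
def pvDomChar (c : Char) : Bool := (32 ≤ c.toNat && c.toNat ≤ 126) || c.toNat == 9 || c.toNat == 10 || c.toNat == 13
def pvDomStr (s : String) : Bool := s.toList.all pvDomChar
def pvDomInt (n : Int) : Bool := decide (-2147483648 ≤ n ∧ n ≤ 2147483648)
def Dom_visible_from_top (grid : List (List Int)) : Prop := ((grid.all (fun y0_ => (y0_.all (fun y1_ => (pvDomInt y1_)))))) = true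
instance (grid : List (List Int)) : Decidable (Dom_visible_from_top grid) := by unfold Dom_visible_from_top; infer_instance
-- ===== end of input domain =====

-- B computes each cell directly from the definition (visible iff strictly taller than every
-- cell above it, rescanning the column prefix per cell) instead of A's dynamic-programming
-- sweep threading (visible, running max) pairs; B is shorter but does more comparisons.
-- (A mutates a deepcopy only, so no observable side effects are at stake.)

-- ===== PORT A =====
-- Literal port of A: each cell of row r is fully overwritten before row r+1 reads it,
-- so the rows are built in order (appended one by one, as the outer loop produces them);
-- indexing uses pyGetD (in range under Pre_).
def visible_from_top (grid : List (List Int)) : List (List Bool) :=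
  let n_cols := (PySem.List.pyGetD grid 0 []).length
  let n_rows := grid.length
  let visible_top := (List.range n_rows).foldl (fun acc (row : Nat) =>
    acc ++ [(List.range n_cols).map (fun (col : Nat) =>
      if row = 0 then
        (true, PySem.List.pyGetD (PySem.List.pyGetD grid (row : Int) []) (col : Int) 0)
      else
        let prev := (PySem.List.pyGetD (PySem.List.pyGetD acc ((row : Int) - 1) []) (col : Int) (false, 0)).2
        if PySem.List.pyGetD (PySem.List.pyGetD grid (row : Int) []) (col : Int) 0 > prev then
          (true, PySem.List.pyGetD (PySem.List.pyGetD grid (row : Int) []) (col : Int) 0)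
        else (false, prev))]) ([] : List (List (Bool × Int)))
  visible_top.map (fun r => r.map (fun x => x.1))

-- ===== PORT B =====
-- Literal port of Source B: nested comprehension; `all(... for k in range(r))` is List.all over range.
def visible_from_top_alt (grid : List (List Int)) : List (List Bool) :=
  let n_cols := (PySem.List.pyGetD grid 0 []).length
  (List.range grid.length).map (fun (r : Nat) =>
    (List.range n_cols).map (fun (c : Nat) =>
      decide (r = 0) || (List.range r).all (fun (k : Nat) =>
        decide (PySem.List.pyGetD (PySem.List.pyGetD grid (k : Int) []) (c : Int) 0 <
                PySem.List.pyGetD (PySem.List.pyGetD grid (r : Int) []) (c : Int) 0))))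

-- ===== PRECONDITION & SPEC =====
-- Pre_ excludes exactly the inputs on which A raises: the empty grid (IndexError on grid[0])
-- and ragged grids (IndexError on a short row, or TypeError mapping x[0] over a longer row).
def Pre_visible_from_top (grid : List (List Int)) : Prop :=
  grid ≠ [] ∧ ∀ row ∈ grid, row.length = (grid.headD []).length
instance (grid : List (List Int)) : Decidable (Pre_visible_from_top grid) := by
  unfold Pre_visible_from_top; infer_instance
def pvWitness_visible_from_top : List (List Int) := [[3, 1], [2, 4], [2, 0]]

def Spec_visible_from_top (grid : List (List Int)) (out : List (List Bool)) : Prop := out = visible_from_top_alt grid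
instance (grid : List (List Int)) (out : List (List Bool)) : Decidable (Spec_visible_from_top grid out) := by unfold Spec_visible_from_top; infer_instance

-- ===== CLAIM (what is proved, stated in full; the proofs are below) =====
def Claim_equal_visible_from_top : Prop := ∀ (grid : List (List Int)), Dom_visible_from_top grid → Pre_visible_from_top grid → Spec_visible_from_top grid (visible_from_top grid)

-- ===== LEMMAS AND PROOFS =====

-- reference description of A's table, column by column
def pairsAux (m : Int) : List Int → List (Bool × Int)
  | [] => []
  | h :: t => (if h > m then (true, h) else (false, m)) :: pairsAux (max m h) t

def pairsOf : List Int → List (Bool × Int)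
  | [] => []
  | h :: t => (true, h) :: pairsAux h t

def colOf (grid : List (List Int)) (j : Nat) : List Int := grid.map (fun r => r.getD j 0)

-- the step function of A's inner branch
def stepCell (h m : Int) : Bool × Int := if h > m then (true, h) else (false, m)

theorem pairsAux_recur (l : List Int) (m : Int) (i : Nat) (hi : i + 1 < l.length) :
    (pairsAux m l).getD (i + 1) (false, 0)
      = stepCell (l.getD (i + 1) 0) ((pairsAux m l).getD i (false, 0)).2 := by
  induction l generalizing m i with
  | nil => simp at hi
  | cons h t ih =>
    simp only [pairsAux]
    cases i with
    | zero =>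
      cases t with
      | nil => simp at hi
      | cons h' t' =>
        simp only [List.getD_cons_succ, List.getD_cons_zero, pairsAux]
        have : (if h > m then ((true : Bool), h) else ((false : Bool), m)).2 = max m h := by
          rw [max_def]; split <;> split <;> omega
        rw [this]; rfl
    | succ j =>
      simp only [List.getD_cons_succ]
      exact ih (max m h) j (by simpa using hi)

theorem pairsOf_recur (l : List Int) (i : Nat) (hi : i + 1 < l.length) :
    (pairsOf l).getD (i + 1) (false, 0)
      = stepCell (l.getD (i + 1) 0) (((pairsOf l).getD i (false, 0)).2) := by
  cases l with
  | nil => simp at hi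
  | cons h t =>
    simp only [pairsOf]
    cases i with
    | zero =>
      cases t with
      | nil => simp at hi
      | cons h' t' =>
        simp only [List.getD_cons_succ, List.getD_cons_zero, pairsAux]
        rfl
    | succ j =>
      simp only [List.getD_cons_succ]
      exact pairsAux_recur t h j (by simpa using hi)

theorem getD_map_lt {α β : Type} (f : α → β) (l : List α) (i : Nat) (d : α) (d' : β)
    (hi : i < l.length) : (l.map f).getD i d' = f (l.getD i d) := by
  rw [List.getD_eq_getElem _ _ (by simpa using hi), List.getD_eq_getElem _ _ hi,
    List.getElem_map]

theorem getD_range_map {β : Type} (f : Nat → β) (n i : Nat) (d : β) (hi : i < n) :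
    ((List.range n).map f).getD i d = f i := by
  rw [getD_map_lt f (List.range n) i 0 d (by simpa using hi)]
  congr 1
  rw [List.getD_eq_getElem _ _ (by simpa using hi)]
  simp

-- A's foldl builds exactly the rows of pairsOf of each column
theorem visA_inv (grid : List (List Int)) (hne : grid ≠ [])
    (hall : ∀ row ∈ grid, row.length = (grid.headD []).length) (k : Nat)
    (hk : k ≤ grid.length) :
    (List.range k).foldl (fun acc (row : Nat) =>
      acc ++ [(List.range (PySem.List.pyGetD grid 0 []).length).map (fun (col : Nat) =>
        if row = 0 then
          (true, PySem.List.pyGetD (PySem.List.pyGetD grid (row : Int) []) (col : Int) 0)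
        else
          let prev := (PySem.List.pyGetD (PySem.List.pyGetD acc ((row : Int) - 1) []) (col : Int) (false, 0)).2
          if PySem.List.pyGetD (PySem.List.pyGetD grid (row : Int) []) (col : Int) 0 > prev then
            (true, PySem.List.pyGetD (PySem.List.pyGetD grid (row : Int) []) (col : Int) 0)
          else (false, prev))]) ([] : List (List (Bool × Int)))
      = (List.range k).map (fun r =>
          (List.range (grid.headD []).length).map (fun j =>
            (pairsOf (colOf grid j)).getD r (false, 0))) := by
  have hc0 : (PySem.List.pyGetD grid 0 []).length = (grid.headD []).length := by
    cases grid with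
    | nil => simp at hne
    | cons g gs => simp [PySem.List.pyGetD_zero]
  have hcol_len : ∀ j, (colOf grid j).length = grid.length := by
    intro j; simp [colOf]
  induction k with
  | zero => rfl
  | succ k ih =>
    rw [List.range_succ, List.foldl_append, List.map_append,
      ih (Nat.le_of_succ_le hk)]
    simp only [List.foldl_cons, List.foldl_nil, List.map_cons, List.map_nil]
    congr 1
    rw [hc0]
    congr 1
    apply List.map_congr_left
    intro j hj
    rw [List.mem_range] at hj
    have hkn : k < grid.length := by omega
    have hcell : ∀ i, i < grid.length →
        (grid.getD i []).getD j 0 = (colOf grid j).getD i 0 := by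
      intro i hi
      rw [colOf, getD_map_lt (fun r => r.getD j 0) grid i [] 0 hi]
    cases k with
    | zero =>
      simp only [reduceIte, PySem.List.pyGetD_natCast]
      rw [hcell 0 hkn]
      cases hcg : colOf grid j with
      | nil => exfalso; have := hcol_len j; rw [hcg] at this; cases grid <;> simp_all
      | cons a t => simp [pairsOf]
    | succ r =>
      simp only [if_neg (Nat.succ_ne_zero r)]
      have hidx : ((r + 1 : Nat) : Int) - 1 = ((r : Nat) : Int) := by push_cast; ring
      rw [hidx]
      simp only [PySem.List.pyGetD_natCast]
      rw [getD_range_map _ (r + 1) r [] (by omega),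
        getD_range_map _ _ j (false, 0) hj, hcell (r + 1) hkn]
      rw [pairsOf_recur (colOf grid j) r (by rw [hcol_len]; omega)]
      simp only [stepCell]

-- the visibility bit of A's table = "strictly taller than max m and every earlier cell"
theorem pairsAux_fst (t : List Int) (m : Int) (j : Nat) (hj : j < t.length) :
    ((pairsAux m t).getD j (false, 0)).1
      = decide (m < t.getD j 0 ∧ ∀ k, k < j → t.getD k 0 < t.getD j 0) := by
  induction t generalizing m j with
  | nil => simp at hj
  | cons h t ih =>
    cases j with
    | zero =>
      simp only [pairsAux, List.getD_cons_zero]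
      rcases lt_or_ge m h with hlt | hge
      · rw [if_pos hlt, eq_comm]
        simp only [decide_eq_true_eq]
        exact ⟨hlt, by omega⟩
      · rw [if_neg (by omega), eq_comm, decide_eq_false_iff_not]
        rintro ⟨h1, -⟩; omega
    | succ j =>
      simp only [pairsAux, List.getD_cons_succ]
      rw [ih (max m h) j (by simpa using hj)]
      apply decide_eq_decide.mpr
      constructor
      · rintro ⟨h1, h2⟩
        refine ⟨by omega, ?_⟩
        intro k hk
        cases k with
        | zero => simp only [List.getD_cons_zero]; omega
        | succ k => simp only [List.getD_cons_succ]; exact h2 k (by omega)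
      · rintro ⟨h1, h2⟩
        constructor
        · have := h2 0 (by omega)
          simp only [List.getD_cons_zero] at this ⊢
          omega
        · intro k hk
          have := h2 (k + 1) (by omega)
          simpa using this

theorem cell_eq (l : List Int) (r : Nat) (hr : r < l.length) :
    ((pairsOf l).getD r (false, 0)).1
      = (decide (r = 0) || (List.range r).all (fun k => decide (l.getD k 0 < l.getD r 0))) := by
  cases l with
  | nil => simp at hr
  | cons h t =>
    cases r with
    | zero => simp [pairsOf]
    | succ j =>
      simp only [pairsOf, List.getD_cons_succ]
      rw [pairsAux_fst t h j (by simp at hr; omega)]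
      rw [Bool.eq_iff_iff]
      simp only [Bool.or_eq_true, decide_eq_true_eq, List.all_eq_true, List.mem_range]
      constructor
      · rintro ⟨h1, h2⟩
        right
        intro k hk
        cases k with
        | zero => simpa using h1
        | succ k =>
          simp only [List.getD_cons_succ]
          exact h2 k (by omega)
      · rintro (h1 | h2)
        · omega
        · constructor
          · have := h2 0 (by omega)
            simpa using this
          · intro k hk
            have := h2 (k + 1) (by omega)
            simpa using this

theorem all_congr_mem {α : Type} (l : List α) (f g : α → Bool)
    (h : ∀ x ∈ l, f x = g x) : l.all f = l.all g := by
  induction l with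
  | nil => rfl
  | cons a t ih => simp only [List.all_cons, h a (by simp), ih (fun x hx => h x (by simp [hx]))]

-- ===== VERDICT (by name: the statement is the Claim_ definition above) =====
theorem visible_from_top_spec : Claim_equal_visible_from_top := by
  intro grid _ hpre
  obtain ⟨hne, hall⟩ := hpre
  unfold Spec_visible_from_top
  have hn : 0 < grid.length := by cases grid with | nil => simp at hne | cons _ _ => simp
  have hc0 : (PySem.List.pyGetD grid 0 []).length = (grid.headD []).length := by
    cases grid with
    | nil => simp at hne
    | cons g gs => simp [PySem.List.pyGetD_zero]
  have hcell : ∀ (i j : Nat), i < grid.length →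
      PySem.List.pyGetD (PySem.List.pyGetD grid (i : Int) []) (j : Int) 0
        = (colOf grid j).getD i 0 := by
    intro i j hi
    simp only [PySem.List.pyGetD_natCast]
    rw [colOf, getD_map_lt (fun r => r.getD j 0) grid i [] 0 hi]
  have hA : visible_from_top grid
      = (List.range grid.length).map (fun r => (List.range (grid.headD []).length).map (fun j =>
          ((pairsOf (colOf grid j)).getD r (false, 0)).1)) := by
    simp only [visible_from_top]
    rw [visA_inv grid hne hall grid.length (le_refl _)]
    simp only [List.map_map, Function.comp_def]
  have hB : visible_from_top_alt grid
      = (List.range grid.length).map (fun r =>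
          (List.range (grid.headD []).length).map (fun j =>
            decide (r = 0) || (List.range r).all (fun k =>
              decide ((colOf grid j).getD k 0 < (colOf grid j).getD r 0)))) := by
    unfold visible_from_top_alt
    rw [hc0]
    apply List.map_congr_left
    intro r hr
    rw [List.mem_range] at hr
    apply List.map_congr_left
    intro j _
    congr 1
    apply all_congr_mem
    intro k hk
    rw [List.mem_range] at hk
    rw [hcell k j (by omega), hcell r j hr]
  rw [hA, hB]
  apply List.map_congr_left
  intro r hr
  rw [List.mem_range] at hr
  apply List.map_congr_left
  intro j _
  exact cell_eq (colOf grid j) r (by simp [colOf]; omega)
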